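-- pv_equiv track=rewrite | github.com/weiminn/IS102 | Project 1/Q2/q2a.py | sv_iterative
-- ===== SOURCE A (Python) =====
-- from collections import deque
--
-- def sv_iterative(m):
--   # your code here
--   total = 0
--   q = deque()
--   for i in range(len(m[0])-1):
--     q.append(1)
--
--   for i in range(len(m)):
--     last = 1
--     for j in range(len(m[i])):
--       if i == 0 or j == 0:
--         total += (m[i][j] * 1)
--       else:
--         times = q.popleft() + last
--         total += (m[i][j] * times)
--         q.append(times)
--         last = times
--
--   return total
-- ===== SOURCE B (Python) =====
-- def sv_iterative(m):
--     # Phase 1: build the coefficient table from the SHAPE alone (the weights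
--     # do not depend on the values), using one growing stream with a read
--     # cursor instead of a deque.
--     stream = [1] * (len(m[0]) - 1)   # seed coefficients; grows with every new one
--     t = 0                            # read cursor into stream
--     coeffs = [[1] * len(m[0])]
--     for row in m[1:]:
--         w = []
--         last = 1
--         for _ in row:
--             if w:                    # every column after the first
--                 last = last + stream[t]
--                 t += 1
--                 stream.append(last)
--             w.append(last)
--         coeffs.append(w)
--     # Phase 2: weighted sum of the grid against the coefficient table.
--     total = 0
--     for row, ws in zip(m, coeffs):
--         for x, c in zip(row, ws):
--             total += x * c
--     return total
-- ===== Notes on version B (the rewrite author's own statement) =====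
-- stated objective: alternative
-- what changed: A interleaves one deque-based DP with the accumulation (pop/append per cell); B first builds the whole coefficient table from the row lengths alone, using a growing stream with a read cursor instead of a deque, and then takes the weighted sum of the grid against that table in a separate pass.
import Mathlib
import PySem

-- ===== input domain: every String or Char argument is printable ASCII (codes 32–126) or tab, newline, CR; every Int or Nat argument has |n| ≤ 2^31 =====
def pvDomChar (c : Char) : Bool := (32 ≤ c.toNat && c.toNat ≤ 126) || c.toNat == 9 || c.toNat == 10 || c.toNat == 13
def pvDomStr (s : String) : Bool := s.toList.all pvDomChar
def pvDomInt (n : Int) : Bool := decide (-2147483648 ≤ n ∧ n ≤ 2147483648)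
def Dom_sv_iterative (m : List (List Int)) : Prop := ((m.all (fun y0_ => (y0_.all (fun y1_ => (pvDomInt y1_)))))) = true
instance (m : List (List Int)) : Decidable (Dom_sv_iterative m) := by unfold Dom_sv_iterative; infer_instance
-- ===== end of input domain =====

-- B replaces A's interleaved deque DP by a two-phase computation: it first builds the
-- coefficient table from the row lengths alone (one growing stream with a read cursor),
-- then takes the weighted sum of the grid against that table (objective: alternative).

-- ===== PORT A =====
-- inner-loop body: state (total, q, last, j); q.popleft() on an empty deque raises
-- IndexError in Python (excluded by Pre_); here headI/tail give junk there
def svStepA (i : Nat) (st : Int × List Int × Int × Nat) (x : Int) : Int × List Int × Int × Nat :=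
  match st with
  | (total, q, last, j) =>
    if i = 0 ∨ j = 0 then (total + x * 1, q, last, j + 1)
    else
      let times := q.headI + last
      (total + x * times, q.tail ++ [times], times, j + 1)

-- outer-loop body: state (total, q, i)
def svOuterStep (st : Int × List Int × Nat) (row : List Int) : Int × List Int × Nat :=
  match st with
  | (total, q, i) =>
    let r := row.foldl (svStepA i) (total, q, 1, 0)
    (r.1, r.2.1, i + 1)

def sv_iterative (m : List (List Int)) : Int :=
  -- q = deque(); for i in range(len(m[0])-1): q.append(1)
  -- (m[0] raises IndexError on empty m — excluded by Pre_; headI then gives [])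
  let q0 := (PySem.List.pyRange 0 ((m.headI.length : Int) - 1) 1).foldl (fun q _ => q ++ [(1 : Int)]) []
  (m.foldl svOuterStep (0, q0, 0)).1

-- ===== PORT B =====
-- coefficient-building inner step: state (stream, t, last, w); stream[t] out of range
-- raises IndexError in Python (excluded by Pre_); getD gives junk there
def altStep (st : List Int × Nat × Int × List Int) (_x : Int) : List Int × Nat × Int × List Int :=
  match st with
  | (stream, t, last, w) =>
    if w = [] then (stream, t, last, w ++ [last])
    else
      let last' := last + stream.getD t 0
      (stream ++ [last'], t + 1, last', w ++ [last'])

def altRow (st : List Int × Nat × List (List Int)) (row : List Int) : List Int × Nat × List (List Int) :=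
  match st with
  | (stream, t, coeffs) =>
    let s := row.foldl altStep (stream, t, 1, [])
    (s.1, s.2.1, coeffs ++ [s.2.2.2])

def sv_iterative_alt (m : List (List Int)) : Int :=
  -- stream = [1] * (len(m[0]) - 1); coeffs = [[1] * len(m[0])]  (Nat subtraction clamps like Python's list-mult)
  let stream0 : List Int := List.replicate (m.headI.length - 1) 1
  let s := m.tail.foldl altRow (stream0, 0, [List.replicate m.headI.length 1])
  (m.zip s.2.2).foldl
    (fun total p => (p.1.zip p.2).foldl (fun total q => total + q.1 * q.2) total) 0

-- ===== PRECONDITION & SPEC =====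
-- Pre_ excludes exactly the inputs where A raises IndexError: the empty grid (m[0]),
-- and grids whose first row has length ≤ 1 while a later row has length ≥ 2
-- (the deque is then empty when popleft() runs).
def Pre_sv_iterative (m : List (List Int)) : Prop :=
  m ≠ [] ∧ (2 ≤ m.headI.length ∨ ∀ r ∈ m.tail, r.length ≤ 1)
instance (m : List (List Int)) : Decidable (Pre_sv_iterative m) := by unfold Pre_sv_iterative; infer_instance

def pvWitness_sv_iterative : List (List Int) := [[1, 2], [3, 4]]

def Spec_sv_iterative (m : List (List Int)) (out : Int) : Prop := out = sv_iterative_alt m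
instance (m : List (List Int)) (out : Int) : Decidable (Spec_sv_iterative m out) := by unfold Spec_sv_iterative; infer_instance

-- ===== CLAIM (what is proved, stated in full; the proofs are below) =====
def Claim_equal_sv_iterative : Prop := ∀ (m : List (List Int)), Dom_sv_iterative m → Pre_sv_iterative m → Spec_sv_iterative m (sv_iterative m)

-- ===== LEMMAS AND PROOFS =====

def pvDot (xs ys : List Int) : Int := ((xs.zip ys).map (fun p => p.1 * p.2)).sum

def pvDotRows (rows ws : List (List Int)) : Int := ((rows.zip ws).map (fun p => pvDot p.1 p.2)).sum

theorem pv_headI_drop (S : List Int) (t : Nat) (h : t < S.length) :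
    (S.drop t).headI = S.getD t 0 := by
  cases hd : S.drop t with
  | nil => exfalso; have := congrArg List.length hd; simp at this; omega
  | cons a l =>
    have h0 : S[t]? = some a := by
      have : (S.drop t)[0]? = S[t + 0]? := List.getElem?_drop
      rw [hd] at this; simpa using this.symm
    simp [List.getD, h0]


theorem pv_q0_eq (n : Nat) :
    (PySem.List.pyRange 0 ((n : Int) - 1) 1).foldl (fun q _ => q ++ [(1 : Int)]) []
      = List.replicate (n - 1) 1 := by
  have h1 : (PySem.List.pyRange 0 ((n : Int) - 1) 1).foldl (fun q _ => q ++ [(1 : Int)]) []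
      = [] ++ (PySem.List.pyRange 0 ((n : Int) - 1) 1).map (fun _ => (1 : Int)) :=
    PySem.List.foldl_append_singleton_eq_map _ _ _
  rw [h1, List.nil_append]
  rw [List.eq_replicate_iff]
  refine ⟨?_, ?_⟩
  · rw [List.length_map, PySem.List.length_pyRange_one]; omega
  · intro b hb; simp at hb; omega


theorem pv_dot_ones (row : List Int) :
    ((row.zip (List.replicate row.length 1)).map (fun p : Int × Int => p.1 * p.2)).sum = row.sum := by
  induction row with
  | nil => simp
  | cons x r ih => simp [List.replicate_succ, ih]


theorem pv_row0 (row : List Int) :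
    ∀ (total last : Int) (q : List Int) (j : Nat),
      row.foldl (svStepA 0) (total, q, last, j) = (total + row.sum, q, last, j + row.length) := by
  induction row with
  | nil => intro total last q j; simp
  | cons x r ih =>
    intro total last q j
    simp only [List.foldl_cons]
    rw [show svStepA 0 (total, q, last, j) x = (total + x * 1, q, last, j + 1) by simp [svStepA]]
    rw [ih]
    refine Prod.ext ?_ (Prod.ext rfl (Prod.ext rfl ?_)) <;> simp
    · ring
    · omega


theorem pv_inner (i : Nat) (hi : i ≠ 0) (rest : List Int) :
    ∀ (total last : Int) (S : List Int) (t : Nat) (q w : List Int) (j : Nat),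
      j ≠ 0 → w ≠ [] → q = S.drop t → S.length = q.length + t → 1 ≤ q.length →
      ∃ ext Sf tf lastf,
        rest.foldl altStep (S, t, last, w) = (Sf, tf, lastf, w ++ ext) ∧
        rest.foldl (svStepA i) (total, q, last, j)
          = (total + pvDot rest ext, Sf.drop tf, lastf, j + rest.length) ∧
        Sf.length = (Sf.drop tf).length + tf ∧ (Sf.drop tf).length = q.length := by
  induction rest with
  | nil =>
    intro total last S t q w j hj hw hq hlen hk
    exact ⟨[], S, t, last, by simp, by simp [pvDot, hq], by subst hq; omega⟩
  | cons x r ih =>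
    intro total last S t q w j hj hw hq hlen hk
    have ht : t < S.length := by omega
    have hqne : q ≠ [] := by
      intro h; rw [h] at hk; simp at hk
    -- B's step
    have hbstep : altStep (S, t, last, w) x
        = (S ++ [last + S.getD t 0], t + 1, last + S.getD t 0, w ++ [last + S.getD t 0]) := by
      simp [altStep, hw]
    -- A's step
    have hhead : q.headI = S.getD t 0 := by rw [hq]; exact pv_headI_drop S t ht
    have hastep : svStepA i (total, q, last, j) x
        = (total + x * (S.getD t 0 + last), q.tail ++ [S.getD t 0 + last], S.getD t 0 + last, j + 1) := by
      simp [svStepA, hi, hj, hhead]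
    set v := S.getD t 0 + last with hv
    have hv' : last + S.getD t 0 = v := by rw [hv]; ring
    -- new invariants
    have hq' : q.tail ++ [v] = (S ++ [v]).drop (t + 1) := by
      rw [hq, List.tail_drop]
      rw [List.drop_append_of_le_length (by omega)]
    have hlen1 : (q.tail ++ [v]).length = q.length := by
      rw [List.length_append, List.length_tail]; simp; omega
    have hlen' : (S ++ [v]).length = (q.tail ++ [v]).length + (t + 1) := by
      rw [List.length_append, hlen1]; simp; omega
    obtain ⟨ext, Sf, tf, lastf, hB, hA, hSf, hqf⟩ :=
      ih (total + x * v) v (S ++ [v]) (t + 1) (q.tail ++ [v]) (w ++ [v]) (j + 1)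
        (by omega) (by simp) hq' hlen' (by rw [hlen1]; exact hk)
    refine ⟨v :: ext, Sf, tf, lastf, ?_, ?_, hSf, by rw [hqf, hlen1]⟩
    · rw [List.foldl_cons, hbstep, hv', hB]; simp
    · rw [List.foldl_cons, hastep, hA]
      refine Prod.ext ?_ (Prod.ext ?_ (Prod.ext ?_ ?_)) <;> simp [pvDot]
      · ring
      · omega


theorem pv_rowStep (i : Nat) (hi : i ≠ 0) (row : List Int) (total : Int)
    (S : List Int) (t : Nat) (q : List Int)
    (hq : q = S.drop t) (hlen : S.length = q.length + t)
    (hcase : 1 ≤ q.length ∨ row.length ≤ 1) :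
    ∃ Sf tf lastB wf lastA,
      row.foldl altStep (S, t, 1, []) = (Sf, tf, lastB, wf) ∧
      row.foldl (svStepA i) (total, q, 1, 0)
        = (total + pvDot row wf, Sf.drop tf, lastA, row.length) ∧
      Sf.length = (Sf.drop tf).length + tf ∧ (Sf.drop tf).length = q.length := by
  cases row with
  | nil =>
    exact ⟨S, t, 1, [], 1, by simp, by simp [pvDot, hq], by subst hq; omega⟩
  | cons x rest =>
    have hb1 : altStep (S, t, 1, ([] : List Int)) x = (S, t, 1, [1]) := by simp [altStep]
    have ha1 : svStepA i (total, q, 1, 0) x = (total + x * 1, q, 1, 1) := by simp [svStepA]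
    rcases hcase with hk | hshort
    · obtain ⟨ext, Sf, tf, lastf, hB, hA, hSf, hqf⟩ :=
        pv_inner i hi rest (total + x * 1) 1 S t q [1] 1 (by omega) (by simp) hq hlen hk
      refine ⟨Sf, tf, lastf, 1 :: ext, lastf, ?_, ?_, hSf, hqf⟩
      · rw [List.foldl_cons, hb1, hB]; simp
      · rw [List.foldl_cons, ha1, hA]
        refine Prod.ext ?_ (Prod.ext rfl (Prod.ext rfl ?_)) <;> simp [pvDot]
        · ring
        · omega
    · have : rest = [] := by
        cases rest with
        | nil => rfl
        | cons a l => simp at hshort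
      subst this
      refine ⟨S, t, 1, [1], 1, ?_, ?_, by subst hq; omega, by subst hq; rfl⟩
      · rw [List.foldl_cons, hb1]; simp
      · rw [List.foldl_cons, ha1]; simp [pvDot, hq]


theorem pv_outer (rows : List (List Int)) :
    ∀ (i : Nat), i ≠ 0 → ∀ (total : Int) (q S : List Int) (t : Nat) (acc : List (List Int)),
      q = S.drop t → S.length = q.length + t →
      (1 ≤ q.length ∨ ∀ r ∈ rows, r.length ≤ 1) →
      ∃ Sf tf news,
        rows.foldl altRow (S, t, acc) = (Sf, tf, acc ++ news) ∧
        (rows.foldl svOuterStep (total, q, i)).1 = total + pvDotRows rows news := by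
  induction rows with
  | nil =>
    intro i hi total q S t acc hq hlen hcase
    exact ⟨S, t, [], by simp, by simp [pvDotRows]⟩
  | cons row rows ih =>
    intro i hi total q S t acc hq hlen hcase
    have hcase1 : 1 ≤ q.length ∨ row.length ≤ 1 := by
      rcases hcase with h | h
      · exact Or.inl h
      · exact Or.inr (h row (by simp))
    obtain ⟨S1, t1, lastB, wf, lastA, hB1, hA1, hS1, hq1⟩ :=
      pv_rowStep i hi row total S t q hq hlen hcase1
    have hrowB : altRow (S, t, acc) row = (S1, t1, acc ++ [wf]) := by
      simp [altRow, hB1]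
    have hrowA : svOuterStep (total, q, i) row = (total + pvDot row wf, S1.drop t1, i + 1) := by
      simp [svOuterStep, hA1]
    have hcase' : 1 ≤ (S1.drop t1).length ∨ ∀ r ∈ rows, r.length ≤ 1 := by
      rcases hcase with h | h
      · exact Or.inl (by omega)
      · exact Or.inr (fun r hr => h r (by simp [hr]))
    obtain ⟨Sf, tf, news, hB, hA⟩ :=
      ih (i + 1) (by omega) (total + pvDot row wf) (S1.drop t1) S1 t1 (acc ++ [wf]) rfl hS1 hcase'
    refine ⟨Sf, tf, wf :: news, ?_, ?_⟩
    · rw [List.foldl_cons, hrowB, hB]; simp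
    · rw [List.foldl_cons, hrowA, hA]
      simp [pvDotRows]; ring


theorem pv_foldl_mul_add (l : List (Int × Int)) :
    ∀ (total : Int), l.foldl (fun total q => total + q.1 * q.2) total
      = total + (l.map (fun q => q.1 * q.2)).sum := by
  induction l with
  | nil => intro total; simp
  | cons a l ih => intro total; rw [List.foldl_cons, ih]; simp; ring


theorem pv_phase2 (ps : List (List Int × List Int)) :
    ∀ (total : Int),
      ps.foldl (fun total p => (p.1.zip p.2).foldl (fun total q => total + q.1 * q.2) total) total
        = total + (ps.map (fun p => pvDot p.1 p.2)).sum := by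
  induction ps with
  | nil => intro total; simp
  | cons p ps ih =>
    intro total
    rw [List.foldl_cons, ih]
    rw [pv_foldl_mul_add]
    simp [pvDot]; ring


theorem pv_main (m : List (List Int)) (hne : m ≠ [])
    (hd : 2 ≤ m.headI.length ∨ ∀ r ∈ m.tail, r.length ≤ 1) :
    sv_iterative m = sv_iterative_alt m := by
  cases m with
  | nil => cases hne rfl
  | cons r0 rest =>
    simp only [List.headI_cons, List.tail_cons] at hd
    simp only [sv_iterative, sv_iterative_alt, List.headI_cons, List.tail_cons]
    rw [pv_q0_eq r0.length]
    rw [List.foldl_cons]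
    have h0 : svOuterStep (0, List.replicate (r0.length - 1) 1, 0) r0
        = (r0.sum, List.replicate (r0.length - 1) 1, 1) := by
      simp [svOuterStep, pv_row0]
    rw [h0]
    have hcase : 1 ≤ (List.replicate (r0.length - 1) (1 : Int)).length ∨ ∀ r ∈ rest, r.length ≤ 1 := by
      rcases hd with h | h
      · left; simp; omega
      · exact Or.inr h
    obtain ⟨Sf, tf, news, hB, hA⟩ :=
      pv_outer rest 1 one_ne_zero r0.sum (List.replicate (r0.length - 1) 1)
        (List.replicate (r0.length - 1) 1) 0 [List.replicate r0.length 1]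
        (by simp) (by simp) hcase
    rw [hA, hB]
    have hproj : ((Sf, tf, [List.replicate r0.length (1 : Int)] ++ news) :
        List Int × Nat × List (List Int)).2.2 = List.replicate r0.length 1 :: news := rfl
    rw [hproj]
    rw [List.zip_cons_cons, List.foldl_cons, pv_phase2]
    rw [pv_foldl_mul_add]
    have : ((r0.zip (List.replicate r0.length 1)).map (fun q : Int × Int => q.1 * q.2)).sum = r0.sum :=
      pv_dot_ones r0
    rw [this]
    simp [pvDotRows, pvDot]

-- ===== VERDICT (by name: the statement is the Claim_ definition above) =====
theorem sv_iterative_spec : Claim_equal_sv_iterative := by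
  intro m _hdom hpre
  unfold Spec_sv_iterative
  exact pv_main m hpre.1 hpre.2
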